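-- pv_equiv track=rewrite | github.com/DongilMin/Programmers | 프로그래머스/2/131127. 할인 행사/할인 행사.py | solution
-- ===== SOURCE A (Python) =====
-- from collections import Counter
-- from collections import defaultdict
--
-- def solution(want, number, discount):
--
--     want_dict = defaultdict(int)
--
--     result = 0
--     for i in range(len(want)):
--         want_dict[want[i]] = number[i]
--
--     for day in range(len(discount) - 9):
--         sub_sequence = discount[day:day + 10]
--
--         if Counter(sub_sequence) == want_dict:
--             result += 1
--
--     return result
-- ===== SOURCE B (Python) =====
-- def solution(want, number, discount):
--     # Build the wanted counts (last number wins per key), then slide a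
--     # 10-day window over discount, maintaining a running count dict
--     # (zero entries removed) instead of rebuilding a Counter per window.
--     target = {}
--     for w, n in zip(want, number):
--         target[w] = n
--     m = len(discount)
--     if m < 10:
--         return 0
--     cnt = {}
--     for item in discount[:10]:
--         cnt[item] = cnt.get(item, 0) + 1
--     result = 1 if cnt == target else 0
--     for day in range(1, m - 9):
--         out = discount[day - 1]
--         if cnt[out] == 1:
--             del cnt[out]
--         else:
--             cnt[out] -= 1
--         new = discount[day + 9]
--         cnt[new] = cnt.get(new, 0) + 1
--         if cnt == target:
--             result += 1
--     return result
-- ===== Notes on version B (the rewrite author's own statement) =====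
-- stated objective: faster
-- what changed: Instead of rebuilding a Counter over discount[day:day+10] for every window, B builds the count dict of the first window once and slides it, removing the outgoing day and adding the incoming day, comparing the running dict with the target each step.
import Mathlib
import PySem

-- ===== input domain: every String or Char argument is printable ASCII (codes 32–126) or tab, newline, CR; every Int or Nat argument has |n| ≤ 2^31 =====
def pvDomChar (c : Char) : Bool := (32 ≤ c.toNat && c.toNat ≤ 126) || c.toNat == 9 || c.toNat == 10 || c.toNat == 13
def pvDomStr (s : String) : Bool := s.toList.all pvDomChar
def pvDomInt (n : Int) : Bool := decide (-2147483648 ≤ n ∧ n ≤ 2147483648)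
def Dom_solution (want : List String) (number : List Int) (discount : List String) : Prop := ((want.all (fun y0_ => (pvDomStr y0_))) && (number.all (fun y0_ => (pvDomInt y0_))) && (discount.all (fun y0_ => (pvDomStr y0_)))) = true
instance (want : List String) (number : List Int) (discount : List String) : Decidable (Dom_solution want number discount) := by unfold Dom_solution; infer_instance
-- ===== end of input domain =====

-- B maintains one running count dict over the sliding 10-day window instead of
-- rebuilding a Counter for every window (objective: faster; measured ~4x on large inputs).

-- Python's dict `==` (content equality, ignoring insertion order); both Pythons
-- compare dicts with `==` (`Counter(sub) == want_dict` in A, `cnt == target` in B).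
def pyDictEq (d1 d2 : PySem.Dict String Int) : Bool :=
  d1.size == d2.size && d1.items.all (fun kv => d2.get? kv.1 == some kv.2)

-- ===== PORT A =====
def solution (want : List String) (number : List Int) (discount : List String) : Int :=
  -- want_dict = defaultdict(int); for i in range(len(want)): want_dict[want[i]] = number[i]
  let wantDict := (PySem.List.pyRange 0 (want.length : Int)).foldl
    (fun d i => d.insert ((PySem.List.pyGet? want i).getD "") ((PySem.List.pyGet? number i).getD 0))
    PySem.Dict.empty
  -- for day in range(len(discount) - 9): if Counter(discount[day:day+10]) == want_dict: result += 1
  (PySem.List.pyRange 0 ((discount.length : Int) - 9)).foldl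
    (fun result day =>
      let subSequence := PySem.List.slice discount (some day) (some (day + 10))
      if pyDictEq (PySem.Dict.counter subSequence) wantDict then result + 1 else result)
    0

-- ===== PORT B =====
def solution_alt (want : List String) (number : List Int) (discount : List String) : Int :=
  let target := (want.zip number).foldl (fun d p => d.insert p.1 p.2) PySem.Dict.empty
  let m : Int := (discount.length : Int)
  if m < 10 then 0
  else
    -- cnt = counts of discount[:10]
    let cnt0 := (PySem.List.slice discount none (some 10)).foldl
      (fun d item => d.insert item (d.getD item 0 + 1)) PySem.Dict.empty
    let result0 : Int := if pyDictEq cnt0 target then 1 else 0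
    -- slide: drop discount[day-1], add discount[day+9]
    -- (cnt[out] is always present in Python; .getD only totalises the lookup)
    let st := (PySem.List.pyRange 1 (m - 9)).foldl
      (fun (st : PySem.Dict String Int × Int) day =>
        let out := (PySem.List.pyGet? discount (day - 1)).getD ""
        let cnt1 := if st.1.getD out 0 == 1 then st.1.erase out
                    else st.1.insert out (st.1.getD out 0 - 1)
        let nw := (PySem.List.pyGet? discount (day + 9)).getD ""
        let cnt2 := cnt1.insert nw (cnt1.getD nw 0 + 1)
        (cnt2, if pyDictEq cnt2 target then st.2 + 1 else st.2))
      (cnt0, result0)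
    st.2

-- ===== PRECONDITION & SPEC =====
-- Pre_ excludes exactly the inputs where A raises IndexError (number shorter than want).
def Pre_solution (want : List String) (number : List Int) (discount : List String) : Prop :=
  want.length ≤ number.length
instance (want : List String) (number : List Int) (discount : List String) : Decidable (Pre_solution want number discount) := by unfold Pre_solution; infer_instance
def pvWitness_solution : List String × List Int × List String :=
  (["a"], [2], ["a", "a", "b", "a", "a", "a", "b", "a", "a", "a", "b", "a"])

def Spec_solution (want : List String) (number : List Int) (discount : List String) (out : Int) : Prop := out = solution_alt want number discount
instance (want : List String) (number : List Int) (discount : List String) (out : Int) : Decidable (Spec_solution want number discount out) := by unfold Spec_solution; infer_instance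

-- ===== CLAIM (what is proved, stated in full; the proofs are below) =====
def Claim_equal_solution : Prop := ∀ (want : List String) (number : List Int) (discount : List String), Dom_solution want number discount → Pre_solution want number discount → Spec_solution want number discount (solution want number discount)

-- ===== LEMMAS AND PROOFS =====

-- the 10-day window starting at day d
def winW (discount : List String) (d : Nat) : List String := (discount.drop d).take 10
-- what a zero-free count dict answers at key k for the multiset of l
def cntOpt (l : List String) (k : String) : Option Int :=
  if l.count k = 0 then none else some ((l.count k : Int))

theorem get?_erase_dict (d : PySem.Dict String Int) (k k' : String) :
    (d.erase k).get? k' = if k' = k then none else d.get? k' := by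
  simp only [PySem.Dict.erase, PySem.Dict.get?]
  induction d.items with
  | nil => simp
  | cons p rest ih =>
    rcases p with ⟨a, v⟩
    by_cases hak : a = k <;> by_cases hk' : a = k' <;>
      simp_all [beq_iff_eq]

theorem nodup_keys_erase_dict (d : PySem.Dict String Int) (k : String)
    (h : d.keys.Nodup) : (d.erase k).keys.Nodup := by
  simp only [PySem.Dict.erase, PySem.Dict.keys] at *
  exact (List.Sublist.map _ List.filter_sublist).nodup h

theorem size_eq_keys_length (d : PySem.Dict String Int) : d.size = d.keys.length := by
  simp [PySem.Dict.size, PySem.Dict.keys]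

theorem counter_get? (xs : List String) (k : String) :
    (PySem.Dict.counter xs).get? k = cntOpt xs k := by
  unfold cntOpt
  by_cases hk : k ∈ xs
  · have hne : (PySem.Dict.counter xs).get? k ≠ none := by
      intro hc
      rw [PySem.Dict.get?_eq_none_iff_not_mem_keys _ _] at hc
      exact hc (by simp [PySem.Dict.keys_counter, PySem.Set.mem_ofList, hk])
    obtain ⟨v, hv⟩ := Option.ne_none_iff_exists'.mp hne
    have hgd := PySem.Dict.getD_of_get?_eq_some _ 0 hv
    rw [PySem.Dict.getD_counter] at hgd
    rw [hv, if_neg (by have : 0 < List.count k xs := List.count_pos_iff.mpr hk; omega), ← hgd]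
  · have h0 : xs.count k = 0 := List.count_eq_zero.mpr hk
    rw [h0, if_pos rfl, PySem.Dict.get?_eq_none_iff_not_mem_keys _ _]
    simp [PySem.Dict.keys_counter, PySem.Set.mem_ofList, hk]

theorem pyDictEq_true_iff (d1 d2 : PySem.Dict String Int)
    (h1 : d1.keys.Nodup) (h2 : d2.keys.Nodup) :
    pyDictEq d1 d2 = true ↔ ∀ k, d1.get? k = d2.get? k := by
  unfold pyDictEq
  simp only [Bool.and_eq_true, beq_iff_eq, List.all_eq_true]
  constructor
  · rintro ⟨hsize, hall⟩ k
    cases h1k : d1.get? k with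
    | some v =>
      exact ((hall (k, v) ((PySem.Dict.get?_eq_some_iff_mem_items d1 k v h1).mp h1k))).symm
    | none =>
      have hsub : d1.keys.toFinset ⊆ d2.keys.toFinset := by
        intro a ha
        simp only [List.mem_toFinset] at ha ⊢
        simp only [PySem.Dict.keys, List.mem_map] at ha
        obtain ⟨⟨a', v'⟩, hmem, rfl⟩ := ha
        have := hall _ hmem
        have : d2.get? a' = some v' := this
        have : a' ∈ d2.keys := by
          by_contra hc
          rw [(PySem.Dict.get?_eq_none_iff_not_mem_keys _ _).mpr hc] at this
          cases this
        exact this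
      have hcard : d2.keys.toFinset.card ≤ d1.keys.toFinset.card := by
        rw [List.toFinset_card_of_nodup h1, List.toFinset_card_of_nodup h2]
        rw [size_eq_keys_length, size_eq_keys_length] at hsize
        omega
      have heq : d1.keys.toFinset = d2.keys.toFinset := Finset.eq_of_subset_of_card_le hsub hcard
      symm
      rw [PySem.Dict.get?_eq_none_iff_not_mem_keys _ _] at h1k ⊢
      intro hc
      exact h1k (by rw [← List.mem_toFinset, heq]; exact List.mem_toFinset.mpr hc)
  · intro h
    constructor
    · rw [size_eq_keys_length, size_eq_keys_length]
      refine (List.perm_ext_iff_of_nodup h1 h2).mpr ?_ |>.length_eq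
      intro a
      constructor <;> intro ha
      · by_contra hc
        have := (PySem.Dict.get?_eq_none_iff_not_mem_keys _ _).mpr hc
        rw [← h a] at this
        exact ((PySem.Dict.get?_eq_none_iff_not_mem_keys _ _).mp this) ha
      · by_contra hc
        have := (PySem.Dict.get?_eq_none_iff_not_mem_keys _ _).mpr hc
        rw [h a] at this
        exact ((PySem.Dict.get?_eq_none_iff_not_mem_keys _ _).mp this) ha
    · intro kv hm
      have := PySem.Dict.get?_of_mem_items _ hm h1
      rw [h kv.1] at this
      exact this

theorem pyDictEq_congr_left (d1 d1' d2 : PySem.Dict String Int)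
    (h1 : d1.keys.Nodup) (h1' : d1'.keys.Nodup) (h2 : d2.keys.Nodup)
    (hp : ∀ k, d1.get? k = d1'.get? k) :
    pyDictEq d1 d2 = pyDictEq d1' d2 := by
  rw [Bool.eq_iff_iff, pyDictEq_true_iff d1 d2 h1 h2, pyDictEq_true_iff d1' d2 h1' h2]
  constructor <;> intro h k
  · rw [← hp k]; exact h k
  · rw [hp k]; exact h k

theorem build_eq (ws : List String) (ns : List Int) (h : ws.length ≤ ns.length) :
    (PySem.List.pyRange 0 (ws.length : Int)).foldl
      (fun d i => d.insert ((PySem.List.pyGet? ws i).getD "") ((PySem.List.pyGet? ns i).getD 0))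
      PySem.Dict.empty
    = (ws.zip ns).foldl (fun d p => d.insert p.1 p.2) PySem.Dict.empty := by
  have hlen : (ws.zip ns).length = ws.length := by
    rw [List.length_zip]; omega
  rw [show (ws.length : Int) = ((ws.zip ns).length : Int) by rw [hlen]]
  rw [← PySem.List.foldl_pyRange_zero_pyGetD' (ws.zip ns) ("", 0)
        (fun d p => d.insert p.1 p.2) PySem.Dict.empty]
  apply PySem.List.foldl_congr_mem
  intro acc x hx
  rw [PySem.List.mem_pyRange_one] at hx
  obtain ⟨hx0, hxlt⟩ := hx
  obtain ⟨j, rfl⟩ : ∃ j : Nat, x = (j : Int) := ⟨x.toNat, (Int.toNat_of_nonneg hx0).symm⟩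
  have hj : j < (ws.zip ns).length := by exact_mod_cast hxlt
  have hjws : j < ws.length := by omega
  have hjns : j < ns.length := by omega
  rw [PySem.List.pyGet?_natCast, PySem.List.pyGet?_natCast]
  simp [PySem.List.pyGetD, PySem.List.pyGet?_natCast, List.getElem?_eq_getElem, hj, hjws, hjns,
    List.getElem_zip]

theorem window_cons (discount : List String) (d : Nat) (hd : d + 10 < discount.length) :
    winW discount d = discount[d]'(by omega) :: (discount.drop (d+1)).take 9 := by
  unfold winW
  rw [List.drop_eq_getElem_cons (by omega)]
  rfl

theorem window_succ (discount : List String) (d : Nat) (hd : d + 10 < discount.length) :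
    winW discount (d + 1)
      = (discount.drop (d+1)).take 9 ++ [discount[d+10]'hd] := by
  unfold winW
  have : List.take (9+1) (List.drop (d+1) discount) = List.take 9 (List.drop (d+1) discount) ++ ((List.drop (d+1) discount)[9]?).toList := List.take_add_one
  rw [show (9:Nat)+1 = 10 from rfl] at this
  rw [this]
  congr 1
  have h9 : 9 < (discount.drop (d+1)).length := by
    rw [List.length_drop]; omega
  rw [List.getElem?_eq_getElem h9]
  simp only [Option.toList_some, List.cons.injEq, and_true]
  rw [List.getElem_drop]

theorem slide_get? (discount : List String) (d : Nat) (hd : d + 10 < discount.length)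
    (cnt : PySem.Dict String Int) (hin : ∀ q, cnt.get? q = cntOpt (winW discount d) q) (q : String) :
    (let out := discount[d]'(by omega)
     let cnt1 := if cnt.getD out 0 == 1 then cnt.erase out
                 else cnt.insert out (cnt.getD out 0 - 1)
     (cnt1.insert (discount[d+10]'hd) (cnt1.getD (discount[d+10]'hd) 0 + 1)).get? q)
    = cntOpt (winW discount (d+1)) q := by
  dsimp only
  set out := discount[d]'(by omega) with hout
  set nw := discount[d+10]'hd with hnw
  set mid := (discount.drop (d+1)).take 9 with hmid
  have hwd : winW discount d = out :: mid := window_cons discount d hd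
  have hwd1 : winW discount (d+1) = mid ++ [nw] := window_succ discount d hd
  have hcout : (winW discount d).count out = mid.count out + 1 := by
    rw [hwd, List.count_cons_self]
  have hgd_out : cnt.getD out 0 = ((mid.count out : Int) + 1) := by
    rw [PySem.Dict.getD_eq_get?_getD, hin out, cntOpt, hcout]
    rw [if_neg (by omega)]
    push_cast
    rfl
  have hcnt1 : ∀ r, (if cnt.getD out 0 == 1 then cnt.erase out
                 else cnt.insert out (cnt.getD out 0 - 1)).get? r = cntOpt mid r := by
    intro r
    by_cases hc1 : mid.count out = 0
    · rw [if_pos (by rw [hgd_out, hc1]; simp)]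
      rw [get?_erase_dict]
      by_cases hr : r = out
      · rw [if_pos hr, cntOpt, hr, if_pos hc1]
      · rw [if_neg hr, hin r, cntOpt, cntOpt, hwd,
            List.count_cons_of_ne (fun h => hr h.symm)]
    · rw [if_neg (by rw [hgd_out]; simp; omega)]
      by_cases hr : r = out
      · subst hr
        rw [PySem.Dict.get?_insert_self, cntOpt, if_neg hc1, hgd_out]
        congr 1
        push_cast
        ring
      · rw [PySem.Dict.get?_insert_of_ne _ _ hr, hin r, cntOpt, cntOpt, hwd,
            List.count_cons_of_ne (fun h => hr h.symm)]
  have hgd_nw : (if cnt.getD out 0 == 1 then cnt.erase out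
                 else cnt.insert out (cnt.getD out 0 - 1)).getD nw 0 = (mid.count nw : Int) := by
    rw [PySem.Dict.getD_eq_get?_getD, hcnt1 nw, cntOpt]
    by_cases h0 : mid.count nw = 0
    · rw [if_pos h0, h0]; rfl
    · rw [if_neg h0]; rfl
  by_cases hq : q = nw
  · subst hq
    rw [PySem.Dict.get?_insert_self, hgd_nw, cntOpt, hwd1]
    rw [if_neg (by simp [List.count_append])]
    rw [List.count_append]
    push_cast
    simp
  · rw [PySem.Dict.get?_insert_of_ne _ _ hq, hcnt1 q, cntOpt, cntOpt, hwd1,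
        List.count_append, List.count_singleton]
    simp [show ¬ (nw = q) from fun h => hq h.symm]

theorem slide_nodup (cnt : PySem.Dict String Int) (hnd : cnt.keys.Nodup) (out nw : String) :
    ((if cnt.getD out 0 == 1 then cnt.erase out
      else cnt.insert out (cnt.getD out 0 - 1)).insert nw
        ((if cnt.getD out 0 == 1 then cnt.erase out
          else cnt.insert out (cnt.getD out 0 - 1)).getD nw 0 + 1)).keys.Nodup := by
  apply PySem.Dict.nodup_keys_insert
  by_cases h : cnt.getD out 0 == 1
  · rw [if_pos h]; exact nodup_keys_erase_dict cnt out hnd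
  · rw [if_neg h]; exact PySem.Dict.nodup_keys_insert _ _ _ hnd

theorem loop_eq (discount : List String) (tgt : PySem.Dict String Int) (htgt : tgt.keys.Nodup) :
    ∀ (k j : Nat), 1 ≤ j → j + k + 9 = discount.length →
    ∀ (cnt : PySem.Dict String Int) (r : Int), cnt.keys.Nodup →
    (∀ q, cnt.get? q = cntOpt (winW discount (j-1)) q) →
    (PySem.List.pyRange (j : Int) ((discount.length : Int) - 9)).foldl
      (fun result day =>
        let subSequence := PySem.List.slice discount (some day) (some (day + 10))
        if pyDictEq (PySem.Dict.counter subSequence) tgt then result + 1 else result) r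
    = ((PySem.List.pyRange (j : Int) ((discount.length : Int) - 9)).foldl
        (fun (st : PySem.Dict String Int × Int) day =>
          let out := (PySem.List.pyGet? discount (day - 1)).getD ""
          let cnt1 := if st.1.getD out 0 == 1 then st.1.erase out
                      else st.1.insert out (st.1.getD out 0 - 1)
          let nw := (PySem.List.pyGet? discount (day + 9)).getD ""
          let cnt2 := cnt1.insert nw (cnt1.getD nw 0 + 1)
          (cnt2, if pyDictEq cnt2 tgt then st.2 + 1 else st.2)) (cnt, r)).2 := by
  intro k
  induction k with
  | zero =>
    intro j hj1 hjlen cnt r hnd hin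
    have hempty : PySem.List.pyRange (j : Int) ((discount.length : Int) - 9) = [] := by
      apply List.eq_nil_of_length_eq_zero
      rw [PySem.List.length_pyRange_one]
      omega
    rw [hempty]
    rfl
  | succ k ih =>
    intro j hj1 hjlen cnt r hnd hin
    have hlt : (j : Int) < (discount.length : Int) - 9 := by omega
    rw [PySem.List.pyRange_one_cons hlt]
    rw [List.foldl_cons, List.foldl_cons]
    -- resolve the indexing in B's step
    have hd : (j - 1) + 10 < discount.length := by omega
    have hout : (PySem.List.pyGet? discount ((j : Int) - 1)).getD ""
        = discount[j-1]'(by omega) := by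
      rw [show (j : Int) - 1 = ((j - 1 : Nat) : Int) by omega, PySem.List.pyGet?_natCast,
          List.getElem?_eq_getElem (by omega)]
      rfl
    have hnw : (PySem.List.pyGet? discount ((j : Int) + 9)).getD ""
        = discount[(j-1)+10]'hd := by
      rw [show (j : Int) + 9 = ((j + 9 : Nat) : Int) by omega, PySem.List.pyGet?_natCast,
          List.getElem?_eq_getElem (by omega)]
      simp only [Option.getD_some]
      congr 1
      omega
    -- the slid dict
    set cnt2 := ((if cnt.getD (discount[j-1]'(by omega)) 0 == 1 then cnt.erase (discount[j-1]'(by omega))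
                  else cnt.insert (discount[j-1]'(by omega)) (cnt.getD (discount[j-1]'(by omega)) 0 - 1)).insert
                   (discount[(j-1)+10]'hd)
                   ((if cnt.getD (discount[j-1]'(by omega)) 0 == 1 then cnt.erase (discount[j-1]'(by omega))
                     else cnt.insert (discount[j-1]'(by omega)) (cnt.getD (discount[j-1]'(by omega)) 0 - 1)).getD (discount[(j-1)+10]'hd) 0 + 1)) with hcnt2
    have hin2 : ∀ q, cnt2.get? q = cntOpt (winW discount j) q := by
      intro q
      have := slide_get? discount (j-1) hd cnt hin q
      dsimp only at this
      rw [hcnt2]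
      rw [this]
      rw [show j - 1 + 1 = j from by omega]
    have hnd2 : cnt2.keys.Nodup := by
      rw [hcnt2]; exact slide_nodup cnt hnd _ _
    -- A's window = winW discount j
    have hslice : PySem.List.slice discount (some (j : Int)) (some ((j : Int) + 10))
        = winW discount j := by
      rw [PySem.List.slice_toNat discount (by omega) (by omega)]
      unfold winW
      congr 1 <;> omega
    -- equal conditions
    have hcond : pyDictEq (PySem.Dict.counter (winW discount j)) tgt = pyDictEq cnt2 tgt := by
      apply pyDictEq_congr_left _ _ _ (PySem.Dict.nodup_keys_counter _) hnd2 htgt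
      intro q
      rw [counter_get?, hin2]
    -- rewrite B's step
    dsimp only
    rw [hout, hnw, ← hcnt2, hslice, hcond]
    have hrec := ih (j+1) (by omega) (by omega) cnt2 (if pyDictEq cnt2 tgt then r + 1 else r) hnd2
      (by intro q; rw [show j + 1 - 1 = j from rfl]; exact hin2 q)
    rw [show (((j + 1 : Nat)) : Int) = (j : Int) + 1 by omega] at hrec
    exact hrec

-- ===== VERDICT =====
theorem solution_spec : Claim_equal_solution := by
  intro want number discount _ hPre
  unfold Spec_solution
  unfold Pre_solution at hPre
  unfold solution solution_alt
  dsimp only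
  rw [build_eq want number hPre]
  set tgt := (want.zip number).foldl (fun d p => d.insert p.1 p.2) PySem.Dict.empty with htgtdef
  have htgt : tgt.keys.Nodup := by
    rw [htgtdef]
    exact PySem.Dict.nodup_keys_foldl_insert_key _ Prod.fst (fun d p => p.2) _
      PySem.Dict.nodup_keys_empty
  by_cases hlen : (discount.length : Int) < 10
  · rw [if_pos hlen]
    have hempty : PySem.List.pyRange 0 ((discount.length : Int) - 9) = [] := by
      apply List.eq_nil_of_length_eq_zero
      rw [PySem.List.length_pyRange_one]
      omega
    rw [hempty]
    rfl
  · rw [if_neg hlen]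
    have hn : 10 ≤ discount.length := by omega
    -- cnt0 = counter of the first window
    have hcnt0 : (PySem.List.slice discount none (some 10)).foldl
        (fun d item => d.insert item (d.getD item 0 + 1)) PySem.Dict.empty
        = PySem.Dict.counter (winW discount 0) := by
      rw [PySem.List.slice_to discount (by omega)]
      rw [PySem.Dict.foldl_insert_getD_add_one_eq_counter]
      unfold winW
      rw [List.drop_zero]
      rfl
    rw [hcnt0]
    -- peel the first iteration of A's loop
    have hcons : PySem.List.pyRange 0 ((discount.length : Int) - 9)
        = 0 :: PySem.List.pyRange 1 ((discount.length : Int) - 9) := by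
      exact PySem.List.pyRange_one_cons (by omega)
    rw [hcons, List.foldl_cons]
    have hslice0 : PySem.List.slice discount (some 0) (some (0 + 10)) = winW discount 0 := by
      rw [show ((0 : Int) + 10) = 10 from rfl]
      rw [PySem.List.slice_toNat discount (by omega) (by omega)]
      unfold winW
      congr 1
    rw [hslice0]
    have := loop_eq discount tgt htgt (discount.length - 10) 1 (by omega) (by omega)
      (PySem.Dict.counter (winW discount 0))
      (if pyDictEq (PySem.Dict.counter (winW discount 0)) tgt then 1 else 0)
      (PySem.Dict.nodup_keys_counter _)
      (by intro q; rw [counter_get?])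
    rw [show ((1 : Nat) : Int) = (1 : Int) from rfl] at this
    rw [show (if pyDictEq (PySem.Dict.counter (winW discount 0)) tgt = true then (0:Int) + 1 else 0)
          = (if pyDictEq (PySem.Dict.counter (winW discount 0)) tgt = true then (1:Int) else 0) from by
        by_cases hc : pyDictEq (PySem.Dict.counter (winW discount 0)) tgt = true <;> simp [hc]]
    rw [this]
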